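-- pv_equiv track=rewrite | github.com/Dudzian/Dudzian | bot_core/security/fingerprint.py | _detect_vm_process_signals
-- ===== SOURCE A (Python) =====
-- from typing import Any, Callable, Iterable, Mapping, MutableMapping, Optional, Sequence, cast
--
-- _VM_PROCESS_PATTERNS: tuple[tuple[str, str], ...] = (
--     ("vboxservice", "VirtualBox Tools"),
--     ("vboxtray", "VirtualBox Tools"),
--     ("vmtoolsd", "VMware Tools"),
--     ("vmware", "VMware"),
--     ("qemu-ga", "QEMU guest agent"),
--     ("qemu-guest-agent", "QEMU guest agent"),
--     ("hyperv", "Hyper-V"),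
--     ("hyper-v", "Hyper-V"),
--     ("xenstore", "Xen tools"),
--     ("xenstored", "Xen tools"),
--     ("prl_tools", "Parallels Tools"),
--     ("prlcc", "Parallels Tools"),
-- )
--
-- def _detect_vm_process_signals(processes: Sequence[str]) -> list[str]:
--     signals: list[str] = []
--     for process in processes:
--         lowered = process.strip().lower()
--         if not lowered:
--             continue
--         for pattern, description in _VM_PROCESS_PATTERNS:
--             if pattern in lowered:
--                 signals.append(f"Wykryto proces narzędzi hypervisora ({process.strip()}).")
--                 break
--     return signals
-- ===== SOURCE B (Python) =====
-- import re
-- from typing import Sequence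
--
-- _VM_PROCESS_PATTERNS: tuple[tuple[str, str], ...] = (
--     ("vboxservice", "VirtualBox Tools"),
--     ("vboxtray", "VirtualBox Tools"),
--     ("vmtoolsd", "VMware Tools"),
--     ("vmware", "VMware"),
--     ("qemu-ga", "QEMU guest agent"),
--     ("qemu-guest-agent", "QEMU guest agent"),
--     ("hyperv", "Hyper-V"),
--     ("hyper-v", "Hyper-V"),
--     ("xenstore", "Xen tools"),
--     ("xenstored", "Xen tools"),
--     ("prl_tools", "Parallels Tools"),
--     ("prlcc", "Parallels Tools"),
-- )
--
-- # One compiled alternation of all (escaped) pattern names: a single automaton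
-- # scan per process replaces the inner 12-pattern loop.  An empty stripped
-- # string can never match (every alternative is non-empty), so no guard needed.
-- _VM_RX = re.compile("|".join(re.escape(p) for p, _ in _VM_PROCESS_PATTERNS))
--
-- def _detect_vm_process_signals(processes: Sequence[str]) -> list[str]:
--     return [
--         f"Wykryto proces narzędzi hypervisora ({process.strip()})."
--         for process in processes
--         if _VM_RX.search(process.strip().lower())
--     ]
-- ===== Notes on version B (the rewrite author's own statement) =====
-- stated objective: faster
-- what changed: The inner 12-pattern loop with break is replaced by one precompiled regex alternation (re.escape'd pattern names joined by '|') searched once per process inside a single list comprehension; the redundant empty-string guard is dropped since no non-empty alternative matches an empty string.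
import Mathlib
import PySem

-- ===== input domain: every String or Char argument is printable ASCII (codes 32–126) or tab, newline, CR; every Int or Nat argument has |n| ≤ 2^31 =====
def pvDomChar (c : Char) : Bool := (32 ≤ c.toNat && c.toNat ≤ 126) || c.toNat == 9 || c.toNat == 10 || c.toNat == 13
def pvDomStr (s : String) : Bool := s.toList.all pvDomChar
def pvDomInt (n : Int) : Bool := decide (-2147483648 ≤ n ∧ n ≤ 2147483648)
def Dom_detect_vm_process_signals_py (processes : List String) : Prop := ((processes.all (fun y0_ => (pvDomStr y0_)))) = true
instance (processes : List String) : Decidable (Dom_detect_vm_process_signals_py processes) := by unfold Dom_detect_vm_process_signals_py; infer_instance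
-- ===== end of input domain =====

-- B replaces the inner 12-pattern loop (with break) by one precompiled regex
-- alternation scanned once per process, in a single list comprehension (idiomatic).


-- ===== PORT A =====
def pvVMPatterns : List (String × String) :=
  [("vboxservice", "VirtualBox Tools"),
   ("vboxtray", "VirtualBox Tools"),
   ("vmtoolsd", "VMware Tools"),
   ("vmware", "VMware"),
   ("qemu-ga", "QEMU guest agent"),
   ("qemu-guest-agent", "QEMU guest agent"),
   ("hyperv", "Hyper-V"),
   ("hyper-v", "Hyper-V"),
   ("xenstore", "Xen tools"),
   ("xenstored", "Xen tools"),
   ("prl_tools", "Parallels Tools"),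
   ("prlcc", "Parallels Tools")]

-- inner 'for pattern, description in _VM_PROCESS_PATTERNS: … break'
def pvInnerA (process lowered : String) (signals : List String) : List (String × String) → List String
  | [] => signals
  | (pattern, _description) :: rest =>
      if PySem.Str.isIn pattern lowered then
        signals ++ ["Wykryto proces narzędzi hypervisora (" ++ PySem.Str.strip process ++ ")."]
      else pvInnerA process lowered signals rest

def detect_vm_process_signals_py (processes : List String) : List String :=
  processes.foldl (fun signals process =>
    let lowered := PySem.Str.lower (PySem.Str.strip process)
    if lowered.toList = [] then signals          -- 'if not lowered: continue'
    else pvInnerA process lowered signals pvVMPatterns) []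

-- ===== PORT B =====
-- _VM_RX.search: the compiled alternation of the re.escape'd literal pattern
-- names matches s exactly when some pattern name occurs as a substring of s.
def pvVMRxSearch (s : String) : Bool :=
  pvVMPatterns.any (fun pd => PySem.Str.isIn pd.1 s)

def detect_vm_process_signals_py_alt (processes : List String) : List String :=
  (processes.filter (fun process => pvVMRxSearch (PySem.Str.lower (PySem.Str.strip process)))).map
    (fun process => "Wykryto proces narzędzi hypervisora (" ++ PySem.Str.strip process ++ ").")

-- ===== PRECONDITION & SPEC =====
def Spec_detect_vm_process_signals_py (processes : List String) (out : List String) : Prop := out = detect_vm_process_signals_py_alt processes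
instance (processes : List String) (out : List String) : Decidable (Spec_detect_vm_process_signals_py processes out) := by unfold Spec_detect_vm_process_signals_py; infer_instance

-- ===== CLAIM (what is proved, stated in full; the proofs are below) =====
def Claim_equal_detect_vm_process_signals_py : Prop := ∀ (processes : List String), Dom_detect_vm_process_signals_py processes → Spec_detect_vm_process_signals_py processes (detect_vm_process_signals_py processes)

-- ===== LEMMAS AND PROOFS =====

-- A's inner loop appends the message iff some pattern occurs in `lowered`.
theorem pvInnerA_eq (process lowered : String) (signals : List String)
    (pats : List (String × String)) :
    pvInnerA process lowered signals pats =
      if pats.any (fun pd => PySem.Str.isIn pd.1 lowered) then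
        signals ++ ["Wykryto proces narzędzi hypervisora (" ++ PySem.Str.strip process ++ ")."]
      else signals := by
  induction pats with
  | nil => simp [pvInnerA]
  | cons pd rest ih =>
      obtain ⟨pattern, description⟩ := pd
      cases h : PySem.Str.isIn pattern lowered
      · simp only [pvInnerA, List.any_cons, h, ih, Bool.false_or, Bool.false_eq_true, if_false]
      · simp only [pvInnerA, List.any_cons, h, Bool.true_or, if_true]

-- no pattern of the fixed list occurs in the empty string
theorem pvVMRxSearch_empty (s : String) (h : s.toList = []) : pvVMRxSearch s = false := by
  have hs : s = "" := by
    have := congrArg String.ofList h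
    simpa using this
  subst hs; decide

theorem pvMain (processes : List String) (acc : List String) :
    processes.foldl (fun signals process =>
        let lowered := PySem.Str.lower (PySem.Str.strip process)
        if lowered.toList = [] then signals
        else pvInnerA process lowered signals pvVMPatterns) acc
      = acc ++ detect_vm_process_signals_py_alt processes := by
  induction processes generalizing acc with
  | nil => simp [detect_vm_process_signals_py_alt]
  | cons p ps ih =>
      simp only [List.foldl_cons]
      by_cases hempty : (PySem.Str.lower (PySem.Str.strip p)).toList = []
      · have hrx : pvVMRxSearch (PySem.Str.lower (PySem.Str.strip p)) = false :=
          pvVMRxSearch_empty _ hempty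
        simp only [hempty, if_true, ih]
        simp only [detect_vm_process_signals_py_alt, List.filter_cons, hrx,
          Bool.false_eq_true, if_false]
      · rw [if_neg hempty, pvInnerA_eq]
        cases hrx : pvVMRxSearch (PySem.Str.lower (PySem.Str.strip p))
        · have hany : (pvVMPatterns.any
              (fun pd => PySem.Str.isIn pd.1 (PySem.Str.lower (PySem.Str.strip p)))) = false := hrx
          rw [hany, if_neg (by simp), ih]
          simp only [detect_vm_process_signals_py_alt, List.filter_cons, hrx,
            Bool.false_eq_true, if_false]
        · have hany : (pvVMPatterns.any
              (fun pd => PySem.Str.isIn pd.1 (PySem.Str.lower (PySem.Str.strip p)))) = true := hrx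
          rw [hany, if_pos rfl, ih]
          simp only [detect_vm_process_signals_py_alt, List.filter_cons, hrx, if_true,
            List.map_cons, List.append_assoc, List.singleton_append]

-- ===== VERDICT (by name: the statement is the Claim_ definition above) =====
theorem detect_vm_process_signals_py_spec : Claim_equal_detect_vm_process_signals_py := by
  intro processes _
  show detect_vm_process_signals_py processes = detect_vm_process_signals_py_alt processes
  simpa [detect_vm_process_signals_py] using pvMain processes []
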